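-- pv_equiv track=rewrite | github.com/kimhaggie/Coding_practice | PGR_후보키.py | poss
-- ===== SOURCE A (Python) =====
-- def check(col,relation):
--     key = []
--     for idx in range(len(relation)):
--         cur = ''
--         for j in col:
--             cur+=relation[idx][j]
--         key.append(cur)
--     return len(key) == len(set(key))
--
-- def poss(col,relation):
--     if not check(col,relation):
--         return False
--     for idx in range(len(col)):
--         tmp = col.copy()
--         tmp.pop(idx)
--         if check(tmp,relation):
--             return False
--     return True
-- ===== SOURCE B (Python) =====
-- def sig(row, cols):
--     return ''.join([row[j] for j in cols])
--
-- def has_collision(cols, rows):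
--     rest = rows
--     while rest:
--         head, rest = rest[0], rest[1:]
--         s = sig(head, cols)
--         if any(sig(r, cols) == s for r in rest):
--             return True
--     return False
--
-- def poss(col, relation):
--     if has_collision(col, relation):
--         return False
--     for idx in range(len(col)):
--         if not has_collision(col[:idx] + col[idx+1:], relation):
--             return False
--     return True
-- ===== Notes on version B (the rewrite author's own statement) =====
-- stated objective: alternative
-- what changed: Replaces A's grouping of concatenated projected keys via len(set(...)) by a pairwise row comparison: superkey-ness is tested by comparing each row's projected signature against all later rows, and minimality by requiring a colliding pair after dropping each column.
import Mathlib
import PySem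

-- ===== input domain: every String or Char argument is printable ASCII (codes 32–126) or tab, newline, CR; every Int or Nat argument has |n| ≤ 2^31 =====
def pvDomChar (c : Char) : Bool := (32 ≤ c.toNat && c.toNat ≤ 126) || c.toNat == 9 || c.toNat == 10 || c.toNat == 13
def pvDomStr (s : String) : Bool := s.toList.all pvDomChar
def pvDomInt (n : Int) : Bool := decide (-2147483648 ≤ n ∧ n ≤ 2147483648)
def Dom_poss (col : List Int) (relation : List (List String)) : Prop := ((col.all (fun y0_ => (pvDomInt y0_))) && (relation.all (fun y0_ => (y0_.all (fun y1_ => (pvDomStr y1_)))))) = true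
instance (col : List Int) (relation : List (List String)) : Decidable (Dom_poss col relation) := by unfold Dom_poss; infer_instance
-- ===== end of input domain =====

-- B replaces A's len(set(...)) grouping of concatenated projected keys by a pairwise
-- row-signature comparison (alternative decomposition, similar cost on small inputs).

-- ===== PORT A =====
-- check(col, relation): key[idx] = concatenation of relation[idx][j] for j in col;
-- returns len(key) == len(set(key))
def check (col : List Int) (relation : List (List String)) : Bool :=
  let key := (List.range relation.length).foldl
    (fun key (idx : Nat) =>
      key ++ [col.foldl
        (fun cur j =>
          cur ++ ((PySem.List.pyGet? ((PySem.List.pyGet? relation (idx : Int)).getD []) j).getD ""))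
        ""])
    []
  key.length == (PySem.Set.ofList key).length

def poss (col : List Int) (relation : List (List String)) : Bool :=
  if !(check col relation) then false
  else if (List.range col.length).any
      (fun (idx : Nat) => check (((PySem.List.pop? col (idx : Int)).getD (0, [])).2) relation)
    then false
  else true

-- ===== PORT B =====
-- sig(row, cols) = ''.join([row[j] for j in cols])
def sig (row : List String) (cols : List Int) : String :=
  PySem.Str.join "" (cols.map (fun j => (PySem.List.pyGet? row j).getD ""))

-- while loop of Source B's has_collision: peel the first row, compare with the rest, recurse
def hasCollision (cols : List Int) (rows : List (List String)) : Bool :=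
  match rows with
  | [] => false
  | head :: rest =>
    let s := sig head cols
    if rest.any (fun r => sig r cols == s) then true
    else hasCollision cols rest

def poss_alt (col : List Int) (relation : List (List String)) : Bool :=
  if hasCollision col relation then false
  else (List.range col.length).all
    (fun (idx : Nat) => hasCollision
      (PySem.List.slice col none (some (idx : Int)) ++
       PySem.List.slice col (some ((idx : Int) + 1)) none)
      relation)

-- ===== PRECONDITION & SPEC =====
-- Pre_ excludes exactly the inputs on which Python A raises IndexError:
-- some index in col out of range for some row of relation.
def Pre_poss (col : List Int) (relation : List (List String)) : Prop :=
  ∀ row ∈ relation, ∀ j ∈ col, PySem.Raise.InRange row.length j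
instance (col : List Int) (relation : List (List String)) : Decidable (Pre_poss col relation) := by
  unfold Pre_poss; infer_instance
def pvWitness_poss : List Int × List (List String) := ([0], [["a"], ["b"]])

def Spec_poss (col : List Int) (relation : List (List String)) (out : Bool) : Prop := out = poss_alt col relation
instance (col : List Int) (relation : List (List String)) (out : Bool) : Decidable (Spec_poss col relation out) := by unfold Spec_poss; infer_instance

-- ===== CLAIM (what is proved, stated in full; the proofs are below) =====
def Claim_equal_poss : Prop := ∀ (col : List Int) (relation : List (List String)), Dom_poss col relation → Pre_poss col relation → Spec_poss col relation (poss col relation)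

-- ===== LEMMAS AND PROOFS =====

theorem join_empty_cons (a : String) (l : List String) :
    PySem.Str.join "" (a :: l) = a ++ PySem.Str.join "" l := by
  simp [PySem.Str.join, PySem.Chars.join]
  cases l <;> simp [List.intercalate]

theorem foldl_append_eq_join (f : Int → String) :
    ∀ (cols : List Int) (init : String),
      cols.foldl (fun cur j => cur ++ f j) init = init ++ PySem.Str.join "" (cols.map f)
  | [], init => by simp [PySem.Str.join, PySem.Chars.join, List.intercalate]
  | j :: cols, init => by
    simp only [List.foldl, List.map, join_empty_cons]
    rw [foldl_append_eq_join f cols (init ++ f j)]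
    simp [String.append_assoc]

theorem flatMap_singleton_map {α β : Type} (g : α → β) (l : List α) :
    l.flatMap (fun x => [g x]) = l.map g := by
  induction l <;> simp [*]

theorem map_range_pyGet {α β : Type} (l : List α) (d : α) (f : α → β) :
    (List.range l.length).map (fun (i : Nat) => f ((PySem.List.pyGet? l (i : Int)).getD d))
      = l.map f := by
  apply List.ext_getElem
  · simp
  · intro i h1 h2
    simp only [List.getElem_map, List.getElem_range]
    have hi : i < l.length := by simpa using h2
    simp [PySem.List.pyGet?_natCast, List.getElem?_eq_getElem hi]

theorem beq_len_ofList (l : List String) :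
    (l.length == (PySem.Set.ofList l).length) = decide l.Nodup := by
  have hf : (PySem.Set.ofList l).toFinset = l.toFinset := by
    ext x; simp [List.mem_toFinset, PySem.Set.mem_ofList]
  have hlen : (PySem.Set.ofList l).length = l.dedup.length := by
    rw [← List.card_toFinset l, ← hf, List.toFinset_card_of_nodup (PySem.Set.nodup_ofList l)]
  by_cases h : l.Nodup
  · simp [h, hlen, List.dedup_eq_self.mpr h]
  · simp only [h, decide_false]
    have hsub := List.dedup_sublist l
    have hne : l.dedup ≠ l := fun he => h (he ▸ List.nodup_dedup l)
    have : l.dedup.length < l.length :=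
      lt_of_le_of_ne hsub.length_le (fun he => hne (hsub.eq_of_length he))
    simp [hlen]
    omega

theorem check_eq (col : List Int) (relation : List (List String)) :
    check col relation = decide ((relation.map (fun r => sig r col)).Nodup) := by
  unfold check
  have key_eq :
      (List.range relation.length).foldl
        (fun key (idx : Nat) =>
          key ++ [col.foldl
            (fun cur j =>
              cur ++ ((PySem.List.pyGet? ((PySem.List.pyGet? relation (idx : Int)).getD []) j).getD ""))
            ""])
        []
      = relation.map (fun r => sig r col) := by
    rw [PySem.List.foldl_append_eq_flatMap]
    rw [List.nil_append, flatMap_singleton_map]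
    have := map_range_pyGet relation []
      (fun r => col.foldl (fun cur j => cur ++ ((PySem.List.pyGet? r j).getD "")) "")
    rw [this]
    apply List.map_congr_left
    intro r _
    rw [foldl_append_eq_join]
    simp [sig]
  rw [key_eq, beq_len_ofList]

theorem hasCollision_eq (cols : List Int) :
    ∀ (rows : List (List String)),
      hasCollision cols rows = !decide ((rows.map (fun r => sig r cols)).Nodup)
  | [] => by simp [hasCollision]
  | head :: rest => by
    simp only [hasCollision]
    rw [hasCollision_eq cols rest]
    by_cases h : ∃ r ∈ rest, sig r cols = sig head cols
    · have hany : (rest.any fun r => sig r cols == sig head cols) = true := by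
        simp only [List.any_eq_true, beq_iff_eq]; exact h
      have hnod : ¬ ((head :: rest).map (fun r => sig r cols)).Nodup := by
        simp only [List.map_cons, List.nodup_cons]
        rintro ⟨hmem, -⟩
        exact hmem (by simpa [List.mem_map] using h)
      rw [hany, decide_eq_false hnod]
      simp
    · have hany : (rest.any fun r => sig r cols == sig head cols) = false := by
        simp only [List.any_eq_false, beq_iff_eq]
        intro r hr he
        exact h ⟨r, hr, he⟩
      have hiff : ((head :: rest).map (fun r => sig r cols)).Nodup ↔
          (rest.map (fun r => sig r cols)).Nodup := by
        simp only [List.map_cons, List.nodup_cons]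
        constructor
        · exact fun hn => hn.2
        · intro hn
          refine ⟨?_, hn⟩
          rw [List.mem_map]
          rintro ⟨r, hr, he⟩
          exact h ⟨r, hr, he⟩
      rw [hany]
      by_cases hn : (rest.map (fun r => sig r cols)).Nodup
      · rw [decide_eq_true (hiff.mpr hn), decide_eq_true hn]; simp
      · rw [decide_eq_false (fun hh => hn (hiff.mp hh)), decide_eq_false hn]; simp

theorem any_eq_not_all (l : List Nat) (p q : Nat → Bool) (h : ∀ x ∈ l, p x = !q x) :
    l.any p = !l.all q := by
  induction l with
  | nil => simp
  | cons a t ih =>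
    simp only [List.any_cons, List.all_cons, h a (by simp), Bool.not_and]
    rw [ih (fun x hx => h x (by simp [hx]))]

theorem pop_snd_eq (col : List Int) (idx : Nat) (h : idx < col.length) :
    ((PySem.List.pop? col (idx : Int)).getD (0, [])).2 = col.eraseIdx idx := by
  rw [PySem.List.pop?_natCast col idx h]
  rfl

theorem slice_eq_eraseIdx (col : List Int) (idx : Nat) :
    PySem.List.slice col none (some (idx : Int)) ++
      PySem.List.slice col (some ((idx : Int) + 1)) none = col.eraseIdx idx := by
  have : ((idx : Int) + 1) = ((idx + 1 : Nat) : Int) := by push_cast; ring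
  rw [this, PySem.List.slice_to_natCast, PySem.List.slice_from_natCast,
    List.eraseIdx_eq_take_drop_succ]

-- ===== VERDICT (by name: the statement is the Claim_ definition above) =====
theorem poss_spec : Claim_equal_poss := by
  intro col relation _ _
  unfold Spec_poss poss poss_alt
  rw [check_eq, hasCollision_eq]
  by_cases hc : ((relation.map (fun r => sig r col)).Nodup)
  · simp only [hc, decide_true, Bool.not_true, Bool.false_eq_true, if_false]
    have hflip : ∀ idx ∈ List.range col.length,
        check (((PySem.List.pop? col (idx : Int)).getD (0, [])).2) relation
          = !hasCollision
            (PySem.List.slice col none (some (idx : Int)) ++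
              PySem.List.slice col (some ((idx : Int) + 1)) none) relation := by
      intro idx hidx
      rw [List.mem_range] at hidx
      rw [pop_snd_eq col idx hidx, slice_eq_eraseIdx, check_eq, hasCollision_eq]
      simp
    rw [any_eq_not_all _ _ _ hflip]
    cases (List.range col.length).all
        (fun (idx : Nat) => hasCollision
          (PySem.List.slice col none (some (idx : Int)) ++
            PySem.List.slice col (some ((idx : Int) + 1)) none) relation) <;> simp
  · simp [hc]
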